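-- pv_equiv track=rewrite | github.com/TuyetTran-SNHU/CS499 | Enhanced Artifact/data_preprocessor.py | _truncate_label
-- ===== SOURCE A (Python) =====
-- def _truncate_label(text: str, max_text_len: int) -> str:
--     """
--     Function ctc_loss can't compute loss if it cannot find a mapping between text label and input
--     labels. Repeat letters cost double because of the blank symbol needing to be inserted.
--     If a too-long label is provided, ctc_loss returns an infinite gradient.
--     """
--     cost = 0
--     for i in range(len(text)):
--         "check if the char is a duplicate then +2 to the cost"
--         if i != 0 and text[i] == text[i - 1]:
--             cost += 2
--         else:
--             "+1 if it a special char"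
--             cost += 1
--             "the cost need to be less than the max length of the word"
--         if cost > max_text_len:
--             return text[:i]
--     return text
-- ===== SOURCE B (Python) =====
-- def _truncate_label(text: str, max_text_len: int) -> str:
--     # The CTC cost of a prefix is strictly increasing in its length, so the result
--     # (the longest prefix whose cost stays within the limit) can be found by binary
--     # search on the prefix length, recomputing the cost of a candidate prefix on demand.
--     n = len(text)
--
--     def cost(k):
--         # CTC cost of the length-k prefix: one per char, plus one per adjacent repeat
--         return k + sum(text[j] == text[j - 1] for j in range(1, k))
--
--     lo, hi = 0, n
--     while lo < hi:
--         mid = (lo + hi + 1) // 2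
--         if cost(mid) <= max_text_len:
--             lo = mid
--         else:
--             hi = mid - 1
--     return text[:lo]
-- ===== Notes on version B (the rewrite author's own statement) =====
-- stated objective: alternative
-- what changed: Replaces A's fused left-to-right accumulate-and-early-return loop with a binary search over the prefix length, using that the CTC prefix cost (recomputed per candidate from a range sum) is strictly increasing.
import Mathlib
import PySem

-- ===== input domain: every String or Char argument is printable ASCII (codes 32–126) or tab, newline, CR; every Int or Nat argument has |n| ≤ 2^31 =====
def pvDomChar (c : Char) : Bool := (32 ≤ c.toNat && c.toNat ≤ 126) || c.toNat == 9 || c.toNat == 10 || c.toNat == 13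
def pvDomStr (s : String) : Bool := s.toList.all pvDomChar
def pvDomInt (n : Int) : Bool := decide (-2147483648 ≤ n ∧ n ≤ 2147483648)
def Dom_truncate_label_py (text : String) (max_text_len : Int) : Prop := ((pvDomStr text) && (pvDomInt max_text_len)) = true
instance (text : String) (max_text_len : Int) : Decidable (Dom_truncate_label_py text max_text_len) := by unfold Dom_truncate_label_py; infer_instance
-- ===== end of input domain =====

-- B replaces A's fused accumulate-and-early-return loop by a binary search on the
-- prefix length (the CTC prefix cost is strictly increasing); same result, different algorithm.

-- ===== PORT A =====
-- the 'for i in range(len(text))' loop with its early return; indices i and i-1 are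
-- always in range inside the loop, so getD's default is never used
def pvTruncGoA (cs : List Char) (m : Int) (i : Nat) (cost : Int) : Option Nat :=
  if _h : i < cs.length then
    let cost' := if i ≠ 0 ∧ cs.getD i ' ' = cs.getD (i - 1) ' ' then cost + 2 else cost + 1
    if cost' > m then some i else pvTruncGoA cs m (i + 1) cost'
  else none
termination_by cs.length - i

def truncate_label_py (text : String) (max_text_len : Int) : String :=
  match pvTruncGoA text.toList max_text_len 0 0 with
  | some i => String.ofList (PySem.Chars.slice text.toList none (some (i : Int)))  -- text[:i]
  | none => text

-- ===== PORT B =====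
-- Source B's cost(k): k + sum(text[j] == text[j-1] for j in range(1, k)); inside the
-- search 1 ≤ j < k ≤ len(text), so pyGet? is always some and the default is never used
def pvCostB (cs : List Char) (k : Int) : Int :=
  k + (PySem.List.pyRange 1 k 1).foldl
    (fun s j => s + (if (PySem.List.pyGet? cs j).getD ' ' = (PySem.List.pyGet? cs (j - 1)).getD ' ' then 1 else 0)) 0

-- Source B's 'while lo < hi' binary-search loop
def pvBSearchB (cs : List Char) (m : Int) (lo hi : Nat) : Nat :=
  if lo < hi then
    let mid := (lo + hi + 1) / 2
    if pvCostB cs (mid : Int) ≤ m then pvBSearchB cs m mid hi else pvBSearchB cs m lo (mid - 1)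
  else lo
termination_by hi - lo
decreasing_by all_goals omega

def truncate_label_py_alt (text : String) (max_text_len : Int) : String :=
  String.ofList (PySem.Chars.slice text.toList none
    (some ((pvBSearchB text.toList max_text_len 0 text.toList.length : Nat) : Int)))  -- text[:lo]

-- ===== PRECONDITION & SPEC =====
def Spec_truncate_label_py (text : String) (max_text_len : Int) (out : String) : Prop := out = truncate_label_py_alt text max_text_len
instance (text : String) (max_text_len : Int) (out : String) : Decidable (Spec_truncate_label_py text max_text_len out) := by unfold Spec_truncate_label_py; infer_instance

-- ===== CLAIM (what is proved, stated in full; the proofs are below) =====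
def Claim_equal_truncate_label_py : Prop := ∀ (text : String) (max_text_len : Int), Dom_truncate_label_py text max_text_len → Spec_truncate_label_py text max_text_len (truncate_label_py text max_text_len)

-- ===== LEMMAS AND PROOFS =====

-- reference cost: Cr (k+1) = Cr k + (2 if duplicate at k else 1), Cr 0 = 0
def pvCr (cs : List Char) : Nat → Int
  | 0 => 0
  | k + 1 => pvCr cs k + (if k ≠ 0 ∧ cs.getD k ' ' = cs.getD (k - 1) ' ' then 2 else 1)

theorem pvCr_lt_succ (cs : List Char) (k : Nat) : pvCr cs k < pvCr cs (k + 1) := by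
  simp only [pvCr]; split <;> omega

theorem pvCr_mono (cs : List Char) {j k : Nat} (h : j < k) : pvCr cs j < pvCr cs k := by
  obtain ⟨d, rfl⟩ : ∃ d, k = j + d + 1 := ⟨k - j - 1, by omega⟩
  clear h
  induction d with
  | zero => exact pvCr_lt_succ cs j
  | succ d ih => exact lt_trans ih (pvCr_lt_succ cs (j + d + 1))

theorem pvCr_mono_le (cs : List Char) {j k : Nat} (h : j ≤ k) : pvCr cs j ≤ pvCr cs k := by
  rcases Nat.lt_or_ge j k with h' | h'
  · exact le_of_lt (pvCr_mono cs h')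
  · have : j = k := by omega
    subst this; exact le_refl _

theorem pvCostB_eq (cs : List Char) (k : Nat) (hk : k ≤ cs.length) :
    pvCostB cs (k : Int) = pvCr cs k := by
  induction k with
  | zero =>
    simp [pvCostB, pvCr, PySem.List.pyRange_one_eq_nil (by omega : (0:Int) ≤ 1)]
  | succ k ih =>
    have hk' : k ≤ cs.length := by omega
    by_cases hk0 : k = 0
    · subst hk0
      simp [pvCostB, pvCr, PySem.List.pyRange_one_eq_nil (by omega : (1:Int) ≤ 1)]
    · have h1k : (1 : Int) ≤ (k : Int) := by
        have : 1 ≤ k := Nat.one_le_iff_ne_zero.mpr hk0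
        exact_mod_cast this
      have hsplit : PySem.List.pyRange 1 ((k : Int) + 1) 1
          = PySem.List.pyRange 1 (k : Int) 1 ++ [(k : Int)] :=
        PySem.List.pyRange_one_succ_right h1k
      have hkcast : ((k + 1 : Nat) : Int) = (k : Int) + 1 := by push_cast; ring
      unfold pvCostB
      rw [hkcast, hsplit, List.foldl_append]
      have hbody : ∀ (j : Nat), j < cs.length →
          ((PySem.List.pyGet? cs (j : Int)).getD ' ') = cs.getD j ' ' := by
        intro j hj
        rw [PySem.List.pyGet?_natCast]
        simp [List.getD, hj]
      have hklt : k < cs.length := by omega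
      have hkm1 : k - 1 < cs.length := by omega
      have hj1 : ((k : Int) - 1) = ((k - 1 : Nat) : Int) := by
        have : 1 ≤ k := Nat.one_le_iff_ne_zero.mpr hk0
        push_cast [this]; ring
      unfold pvCostB at ih
      simp only [List.foldl]
      rw [hj1, hbody k hklt, hbody (k - 1) hkm1]
      have hIH := ih hk'
      by_cases hc : cs.getD k ' ' = cs.getD (k - 1) ' '
      · simp only [pvCr, hc, hk0, ne_eq, not_false_iff, and_self, if_pos]
        omega
      · simp only [pvCr, hc, and_false, if_false]
        omega

-- the fused loop of A equals "first index k with Cr (k+1) > m", scanned from i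
theorem pvTruncGoA_eq_find (cs : List Char) (m : Int) :
    ∀ (d i : Nat), cs.length - i = d →
    pvTruncGoA cs m i (pvCr cs i)
      = (List.range' i (cs.length - i)).find? (fun k => decide (pvCr cs (k + 1) > m)) := by
  intro d
  induction d with
  | zero =>
    intro i hd
    have hi : ¬ i < cs.length := by omega
    rw [pvTruncGoA]
    simp [hi, show cs.length - i = 0 by omega]
  | succ d ih =>
    intro i hd
    have hi : i < cs.length := by omega
    have hrange : cs.length - i = (cs.length - (i + 1)) + 1 := by omega
    rw [pvTruncGoA]
    simp only [hi, dif_pos]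
    have hcost : (if i ≠ 0 ∧ cs.getD i ' ' = cs.getD (i - 1) ' '
        then pvCr cs i + 2 else pvCr cs i + 1) = pvCr cs (i + 1) := by
      simp only [pvCr]; split <;> omega
    rw [hcost, hrange, List.range'_succ]
    by_cases hgt : pvCr cs (i + 1) > m
    · simp [hgt]
    · simp only [List.find?_cons, hgt, if_neg, gt_iff_lt, not_false_iff]
      rw [ih (i + 1) (by omega)]
      simp

-- characterization shared by both algorithms: r is THE cut position
def pvIsCut (cs : List Char) (m : Int) (r : Nat) : Prop :=
  r ≤ cs.length ∧ (r = 0 ∨ pvCr cs r ≤ m) ∧ (r = cs.length ∨ pvCr cs (r + 1) > m)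

theorem pvIsCut_unique (cs : List Char) (m : Int) {r₁ r₂ : Nat}
    (h₁ : pvIsCut cs m r₁) (h₂ : pvIsCut cs m r₂) : r₁ = r₂ := by
  by_contra hne
  rcases Nat.lt_or_ge r₁ r₂ with hlt | hge
  · obtain ⟨hle₂, hv₂, _⟩ := h₂
    obtain ⟨_, _, hf₁⟩ := h₁
    have hC₂ : pvCr cs r₂ ≤ m := by
      rcases hv₂ with h | h
      · omega
      · exact h
    have hr₁ : pvCr cs (r₁ + 1) > m := by
      rcases hf₁ with h | h
      · omega
      · exact h
    have : pvCr cs (r₁ + 1) ≤ pvCr cs r₂ := pvCr_mono_le cs (by omega)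
    omega
  · have hlt : r₂ < r₁ := by omega
    obtain ⟨hle₁, hv₁, _⟩ := h₁
    obtain ⟨_, _, hf₂⟩ := h₂
    have hC₁ : pvCr cs r₁ ≤ m := by
      rcases hv₁ with h | h
      · omega
      · exact h
    have hr₂ : pvCr cs (r₂ + 1) > m := by
      rcases hf₂ with h | h
      · omega
      · exact h
    have : pvCr cs (r₂ + 1) ≤ pvCr cs r₁ := pvCr_mono_le cs (by omega)
    omega

-- the binary search returns a cut position, given the loop invariant
theorem pvBSearchB_stop (cs : List Char) (m : Int) (lo hi : Nat)
    (hnlt : ¬ lo < hi) (hlh : lo ≤ hi) (hhn : hi ≤ cs.length)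
    (hval : lo = 0 ∨ pvCr cs lo ≤ m)
    (hfail : ∀ k, hi < k → k ≤ cs.length → pvCr cs k > m) :
    pvIsCut cs m (pvBSearchB cs m lo hi) := by
  rw [pvBSearchB]
  simp only [hnlt, if_neg, not_false_iff]
  refine ⟨by omega, hval, ?_⟩
  by_cases hN : lo = cs.length
  · exact Or.inl hN
  · exact Or.inr (hfail (lo + 1) (by omega) (by omega))

theorem pvBSearchB_isCut (cs : List Char) (m : Int) :
    ∀ (d lo hi : Nat), hi - lo ≤ d → lo ≤ hi → hi ≤ cs.length →
    (lo = 0 ∨ pvCr cs lo ≤ m) → (∀ k, hi < k → k ≤ cs.length → pvCr cs k > m) →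
    pvIsCut cs m (pvBSearchB cs m lo hi) := by
  intro d
  induction d with
  | zero =>
    intro lo hi hd hlh hhn hval hfail
    exact pvBSearchB_stop cs m lo hi (by omega) hlh hhn hval hfail
  | succ d ih =>
    intro lo hi hd hlh hhn hval hfail
    by_cases hlt : lo < hi
    · rw [pvBSearchB]
      simp only [hlt, if_pos]
      have hmid1 : lo < (lo + hi + 1) / 2 := by omega
      have hmid2 : (lo + hi + 1) / 2 ≤ hi := by omega
      by_cases hc : pvCostB cs (((lo + hi + 1) / 2 : Nat) : Int) ≤ m
      · simp only [hc, if_pos]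
        exact ih ((lo + hi + 1) / 2) hi (by omega) (by omega) hhn
          (Or.inr (by rw [pvCostB_eq cs _ (by omega)] at hc; exact hc)) hfail
      · simp only [hc, if_neg, not_false_iff]
        rw [pvCostB_eq cs _ (by omega)] at hc
        refine ih lo ((lo + hi + 1) / 2 - 1) (by omega) (by omega) (by omega) hval ?_
        intro k hk1 hk2
        rcases Nat.lt_or_ge hi k with h | h
        · exact hfail k h hk2
        · have : pvCr cs ((lo + hi + 1) / 2) ≤ pvCr cs k := pvCr_mono_le cs (by omega)
          omega
    · exact pvBSearchB_stop cs m lo hi hlt hlh hhn hval hfail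

-- A's found index (or length when none) is also a cut position
theorem pvFind_isCut (cs : List Char) (m : Int) :
    pvIsCut cs m (match (List.range' 0 cs.length).find? (fun k => decide (pvCr cs (k + 1) > m)) with
      | some i => i
      | none => cs.length) := by
  cases hf : (List.range' 0 cs.length).find? (fun k => decide (pvCr cs (k + 1) > m)) with
  | none =>
    simp only
    refine ⟨le_refl _, ?_, Or.inl rfl⟩
    by_cases hN : cs.length = 0
    · exact Or.inl hN
    · refine Or.inr ?_
      have := List.find?_eq_none.mp hf (cs.length - 1) (by simp [List.mem_range']; omega)
      simp only [decide_eq_true_eq, gt_iff_lt, not_lt] at this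
      have heq : cs.length - 1 + 1 = cs.length := by omega
      rw [heq] at this
      exact this
  | some i =>
    have hmem : i ∈ List.range' 0 cs.length := List.mem_of_find?_eq_some hf
    have hi : i < cs.length := by simp [List.mem_range'] at hmem; omega
    have hp : pvCr cs (i + 1) > m := by
      have := List.find?_some hf
      simpa using this
    simp only
    refine ⟨by omega, ?_, Or.inr hp⟩
    by_cases h0 : i = 0
    · exact Or.inl h0
    · refine Or.inr ?_
      -- i-1 is before the found index, so its predicate is false
      have hbefore : ∀ j ∈ List.range' 0 cs.length, j < i →
          ¬ (pvCr cs (j + 1) > m) := by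
        intro j hjmem hji
        have := List.find?_eq_some_iff_getElem.mp hf
        obtain ⟨-, n, hn, hgetn, hprior⟩ := this
        have hjlt : j < cs.length := by simp [List.mem_range'] at hjmem; omega
        have hjlen : j < (List.range' 0 cs.length).length := by simpa using hjlt
        have hgj : (List.range' 0 cs.length)[j]'hjlen = j := by simp
        have hin : i = n := by
          have hg : (List.range' 0 cs.length)[n]'hn = n := by simp
          rw [hg] at hgetn; omega
        have hpr := hprior j (by omega)
        rw [hgj] at hpr
        simpa using hpr
      have := hbefore (i - 1) (by simp [List.mem_range']; omega) (by omega)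
      have heq : i - 1 + 1 = i := by omega
      rw [heq] at this
      omega

-- ===== VERDICT (by name: the statement is the Claim_ definition above) =====
theorem truncate_label_py_spec : Claim_equal_truncate_label_py := by
  intro text m _
  show truncate_label_py text m = truncate_label_py_alt text m
  unfold truncate_label_py truncate_label_py_alt
  have h0 : (0 : Int) = pvCr text.toList 0 := rfl
  rw [h0, pvTruncGoA_eq_find text.toList m (text.toList.length - 0) 0 rfl]
  have hA := pvFind_isCut text.toList m
  have hB := pvBSearchB_isCut text.toList m text.toList.length 0 text.toList.length (by omega)
    (by omega) (le_refl _) (Or.inl rfl) (by intro k h1 h2; omega)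
  have hEq := pvIsCut_unique text.toList m hA hB
  simp only [Nat.sub_zero] at hEq ⊢
  cases hf : (List.range' 0 text.toList.length).find?
      (fun k => decide (pvCr text.toList (k + 1) > m)) with
  | none =>
    rw [hf] at hEq
    simp only at hEq
    rw [← hEq]
    simp [PySem.Chars.slice, PySem.List.slice_to_natCast]
    rw [show text.length = text.toList.length by simp, List.take_length]
    exact String.ofList_toList.symm
  | some i =>
    rw [hf] at hEq
    simp only at hEq
    rw [← hEq]
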